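-- pv_equiv track=rewrite | github.com/dmi3eva/spiderology_creation | to_simplify/simplifier/utils/dejoiner.py | glue_ripped_lines
-- ===== SOURCE A (Python) =====
-- def glue_ripped_lines(text: str) -> str:
--     lines = text.split("\n")
--     processed_lines = []
--     i = 0
--     while i < len(lines):
--         row = lines[i]
--         insert_if = row.strip().startswith("insert into") and row.count("(") > row.count(")")
--         other_if = row.count("\"") % 2 == 1 or row.count("\'") % 2 == 1
--         if (insert_if or other_if) and i + 1 < len(lines):
--             processed_lines.append(f"{row} {lines[i + 1]}")
--             i += 1
--         else:
--             processed_lines.append(row)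
--         i += 1
--     return "\n".join(processed_lines)
-- ===== SOURCE B (Python) =====
-- def glue_ripped_lines(text: str) -> str:
--     lines = text.split("\n")
--     # pass 1: decide for each line whether it triggers gluing
--     flags = [
--         (row.strip().startswith("insert into") and row.count("(") > row.count(")"))
--         or row.count("\"") % 2 == 1 or row.count("'") % 2 == 1
--         for row in lines
--     ]
--     # pass 2: process maximal runs of triggered lines; inside a run the lines
--     # pair up two by two, and an odd leftover grabs the first line after the run
--     out = []
--     i, n = 0, len(lines)
--     while i < n:
--         if not flags[i]:
--             out.append(lines[i])
--             i += 1
--             continue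
--         j = i
--         while j < n and flags[j]:
--             j += 1
--         run = lines[i:j]
--         while len(run) >= 2:
--             out.append(f"{run[0]} {run[1]}")
--             run = run[2:]
--         if run:
--             if j < n:
--                 out.append(f"{run[0]} {lines[j]}")
--                 j += 1
--             else:
--                 out.append(run[0])
--         i = j
--     return "\n".join(out)
-- ===== Notes on version B (the rewrite author's own statement) =====
-- stated objective: alternative
-- what changed: Replaces A's single interleaved lookahead loop by a two-pass, run-based algorithm: first a list of trigger flags is computed, then maximal runs of triggered lines are pairwise glued in chunks, an odd leftover grabbing the first line after the run.
import Mathlib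
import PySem

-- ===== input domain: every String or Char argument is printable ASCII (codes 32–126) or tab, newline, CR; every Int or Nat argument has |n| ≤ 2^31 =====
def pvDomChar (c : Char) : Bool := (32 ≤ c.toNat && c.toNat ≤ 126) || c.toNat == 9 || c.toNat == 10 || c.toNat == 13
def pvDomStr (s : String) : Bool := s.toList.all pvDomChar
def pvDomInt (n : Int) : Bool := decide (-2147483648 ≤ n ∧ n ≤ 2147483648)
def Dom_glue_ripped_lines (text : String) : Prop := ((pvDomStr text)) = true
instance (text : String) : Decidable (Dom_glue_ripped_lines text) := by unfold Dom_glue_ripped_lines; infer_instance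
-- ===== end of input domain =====

-- B replaces A's interleaved lookahead loop by a two-pass run-based algorithm (flags pass, then pairwise gluing of maximal triggered runs); same return value (objective: alternative, no speed claim).

-- ===== PORT A =====
-- A's while loop (index i over lines, advancing by 1 or 2, reading lines[i+1] as lookahead)
-- as the obvious recursion on the suffix of lines; i + 1 < len(lines) becomes 'rest non-empty'.
-- A's insert_if / other_if locals are inlined into the single condition they feed.
def glueA_go : List String → List String
  | [] => []
  | row :: rest =>
    if (PySem.Str.startswith (PySem.Str.strip row) "insert into"
          && decide (PySem.Str.count row ")" < PySem.Str.count row "("))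
        || ((PySem.Str.count row "\"" % 2 == 1) || (PySem.Str.count row "'" % 2 == 1)) then
      match rest with
      | [] => [row]                                   -- i + 1 < len(lines) fails: plain append
      | nxt :: rest' => PySem.Str.join " " [row, nxt] :: glueA_go rest'
    else row :: glueA_go rest

def glue_ripped_lines (text : String) : String :=
  -- text.split("\n"): sep is the non-empty literal "\n", so split? is always some
  PySem.Str.join "\n" (glueA_go ((PySem.Str.split? text "\n").getD []))

-- ===== PORT B =====
-- pass 1 of Source B: the trigger flag of one line
def glueB_trig (row : String) : Bool :=
  (PySem.Str.startswith (PySem.Str.strip row) "insert into"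
      && decide (PySem.Str.count row ")" < PySem.Str.count row "("))
    || ((PySem.Str.count row "\"" % 2 == 1) || (PySem.Str.count row "'" % 2 == 1))

-- Source B's inner 'while len(run) >= 2' loop: pair up a run two by two, returning
-- the glued pairs and the odd leftover (if any)
def glueB_pairs : List String → List String × Option String
  | [] => ([], none)
  | [x] => ([], some x)
  | x :: y :: rest =>
    let pr := glueB_pairs rest
    (PySem.Str.join " " [x, y] :: pr.1, pr.2)

-- Source B's outer while loop over runs, as recursion on the (line, flag) list
def glueB_go : List (String × Bool) → List String
  | [] => []
  | (l, false) :: rest => l :: glueB_go rest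
  | (l, true) :: rest =>
    let run := l :: (rest.takeWhile (·.2)).map Prod.fst
    let pr := glueB_pairs run
    match pr.2, hA : rest.dropWhile (·.2) with
    | none, _ => pr.1 ++ glueB_go (rest.dropWhile (·.2))
    | some x, [] => pr.1 ++ [x]
    | some x, (nxt, _) :: after' =>
        pr.1 ++ (PySem.Str.join " " [x, nxt] :: glueB_go after')
termination_by zs => zs.length
decreasing_by
  all_goals
    have hdw := List.length_dropWhile_le (fun p : String × Bool => p.2) rest
    simp only [List.length_cons]
    try (have hlen := congrArg List.length hA; simp only [List.length_cons] at hlen)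
    omega

def glue_ripped_lines_alt (text : String) : String :=
  -- lines = text.split("\n") (sep non-empty, so split? is always some)
  PySem.Str.join "\n" (glueB_go (((PySem.Str.split? text "\n").getD []).map (fun l => (l, glueB_trig l))))

-- ===== PRECONDITION & SPEC =====
def Spec_glue_ripped_lines (text : String) (out : String) : Prop := out = glue_ripped_lines_alt text
instance (text : String) (out : String) : Decidable (Spec_glue_ripped_lines text out) := by unfold Spec_glue_ripped_lines; infer_instance

-- ===== CLAIM (what is proved, stated in full; the proofs are below) =====
def Claim_equal_glue_ripped_lines : Prop := ∀ (text : String), Dom_glue_ripped_lines text → Spec_glue_ripped_lines text (glue_ripped_lines text)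

-- ===== LEMMAS AND PROOFS =====

-- the merge equation for B: a triggered first line is glued to the second, whatever
-- its flag is (in a run it becomes the first pair; as an odd leftover it grabs it)
theorem glueB_go_glue (l b : String) (c : Bool) (zs : List (String × Bool)) :
    glueB_go ((l, true) :: (b, c) :: zs)
      = PySem.Str.join " " [l, b] :: glueB_go zs := by
  cases c with
  | false =>
    simp [glueB_go, glueB_pairs, List.takeWhile, List.dropWhile]
  | true =>
    match zs with
    | [] => simp [glueB_go, glueB_pairs, List.takeWhile, List.dropWhile]
    | (r, false) :: zs2 =>
      simp [glueB_go, glueB_pairs, List.takeWhile, List.dropWhile]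
    | (r, true) :: zs2 =>
      simp only [glueB_go, List.takeWhile, List.dropWhile]
      simp only [List.map_cons]
      cases h : (glueB_pairs (r :: (List.takeWhile (·.2) zs2).map Prod.fst)).2 with
      | none => simp [glueB_pairs, h]
      | some x =>
        cases h2 : List.dropWhile (·.2) zs2 with
        | nil => simp [glueB_pairs, h]
        | cons p after' => cases p; simp [glueB_pairs, h]

theorem glueB_eq_glueA (lines : List String) :
    glueB_go (lines.map (fun l => (l, glueB_trig l))) = glueA_go lines := by
  induction lines using glueA_go.induct with
  | case1 => simp [glueB_go, glueA_go]
  | case2 l hcond =>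
    have ht : glueB_trig l = true := hcond
    simp [glueB_go, glueB_pairs, glueA_go, ht]
  | case3 l hcond b rest ih =>
    have ht : glueB_trig l = true := hcond
    simp only [List.map_cons, ht]
    rw [glueB_go_glue, ih]
    simp only [glueA_go]
    rw [hcond]
    simp
  | case4 l rest hcond ih =>
    rw [Bool.not_eq_true] at hcond
    have ht : glueB_trig l = false := hcond
    simp only [List.map_cons, ht, glueB_go]
    rw [ih]
    have : glueA_go (l :: rest) = l :: glueA_go rest := by
      cases rest <;> (simp only [glueA_go]; rw [hcond]; simp)
    rw [this]

-- ===== VERDICT (by name: the statement is the Claim_ definition above) =====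
theorem glue_ripped_lines_spec : Claim_equal_glue_ripped_lines := by
  intro text _
  unfold Spec_glue_ripped_lines glue_ripped_lines glue_ripped_lines_alt
  rw [glueB_eq_glueA]
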